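-- pv_equiv track=rewrite | github.com/PreferredNerd/CMPSC132 | Recursive Triangle.py | recursive_triangle
-- ===== SOURCE A (Python) =====
-- def recursive_triangle(k, n):
--     if n > 0 and k > 0:
--         if k <= n:
--             #Define the base case, which is we are reducing the problem to the k = 1
--             if k == 1:
--                 returnString = ""
--                 for numberOfSpaces in range(n-1):
--                     returnString += " "
--                 returnString += "*"
--                 return returnString
--             #If it has not reduced to this point then we wiull reduce it further to the number of spaces and asteriks and continue to amend the return string.
--             else:
--                 returnString = ""
--                 for numberOfSpaces in range(n-k):
--                     returnString += " "
--                 for numberofAsterisks in range(k):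
--                     returnString += "*"
--                 returnString+="\n"
--                 #Take what we have added onto what is at each deeper iteration
--                 return returnString + recursive_triangle(k-1, n)
--         else:
--             return "Error invalid dimensions"
--     else:
--         return "Error Please submit a valid psoitive non-zero entry"
-- ===== SOURCE B (Python) =====
-- def recursive_triangle(k, n):
--     if n > 0 and k > 0:
--         if k <= n:
--             lines = [" " * (n - i) + "*" * i for i in range(k, 0, -1)]
--             return "\n".join(lines)
--         else:
--             return "Error invalid dimensions"
--     else:
--         return "Error Please submit a valid psoitive non-zero entry"
-- ===== Notes on version B (the rewrite author's own statement) =====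
-- stated objective: simpler
-- what changed: Replaces the recursion on k and the per-character append loops with a single comprehension building each row by string repetition, joined with '\n'.
import Mathlib
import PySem

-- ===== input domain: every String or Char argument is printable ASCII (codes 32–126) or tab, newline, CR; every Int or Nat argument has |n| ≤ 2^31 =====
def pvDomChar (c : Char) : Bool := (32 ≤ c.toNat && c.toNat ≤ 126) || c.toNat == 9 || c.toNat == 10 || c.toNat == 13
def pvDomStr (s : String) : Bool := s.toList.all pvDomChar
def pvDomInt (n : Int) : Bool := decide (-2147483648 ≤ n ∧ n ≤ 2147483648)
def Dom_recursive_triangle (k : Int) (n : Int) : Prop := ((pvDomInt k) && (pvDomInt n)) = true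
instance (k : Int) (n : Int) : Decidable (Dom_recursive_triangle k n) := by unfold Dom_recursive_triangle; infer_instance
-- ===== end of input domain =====

-- B replaces A's recursion on k and per-character append loops by one row-comprehension joined with '\n'; objective: simpler.
-- Both ports work on List Char (Python str) and wrap with String.mk at the end.

-- ===== PORT A =====
-- literal transliteration of A's recursion; the two character-append for-loops are folds over pyRange
def recursive_triangle_chars (k : Int) (n : Int) : List Char :=
  if _h : n > 0 ∧ k > 0 then
    if k ≤ n then
      if _hk1 : k = 1 then
        ((PySem.List.pyRange 0 (n - 1) 1).foldl (fun s _ => s ++ [' ']) []) ++ ['*']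
      else
        (((PySem.List.pyRange 0 k 1).foldl (fun s _ => s ++ ['*'])
            ((PySem.List.pyRange 0 (n - k) 1).foldl (fun s _ => s ++ [' ']) [])) ++ ['\n'])
          ++ recursive_triangle_chars (k - 1) n
    else "Error invalid dimensions".toList
  else "Error Please submit a valid psoitive non-zero entry".toList
termination_by k.toNat
decreasing_by omega

def recursive_triangle (k : Int) (n : Int) : String :=
  String.mk (recursive_triangle_chars k n)

-- ===== PORT B =====
-- one row: " " * (n - i) + "*" * i
def rtRow (n : Int) (i : Int) : List Char :=
  List.replicate (n - i).toNat ' ' ++ List.replicate i.toNat '*'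

def recursive_triangle_alt_chars (k : Int) (n : Int) : List Char :=
  if n > 0 ∧ k > 0 then
    if k ≤ n then
      PySem.Chars.join ['\n'] ((PySem.List.pyRange k 0 (-1)).map (rtRow n))
    else "Error invalid dimensions".toList
  else "Error Please submit a valid psoitive non-zero entry".toList

def recursive_triangle_alt (k : Int) (n : Int) : String :=
  String.mk (recursive_triangle_alt_chars k n)

-- ===== PRECONDITION & SPEC =====
def Spec_recursive_triangle (k : Int) (n : Int) (out : String) : Prop := out = recursive_triangle_alt k n
instance (k : Int) (n : Int) (out : String) : Decidable (Spec_recursive_triangle k n out) := by unfold Spec_recursive_triangle; infer_instance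

-- ===== CLAIM (what is proved, stated in full; the proofs are below) =====
def Claim_equal_recursive_triangle : Prop := ∀ (k : Int) (n : Int), Dom_recursive_triangle k n → Spec_recursive_triangle k n (recursive_triangle k n)

-- ===== LEMMAS AND PROOFS =====

lemma pyRange_neg1_cons (a : Int) (h : 0 < a) :
    PySem.List.pyRange a 0 (-1) = a :: PySem.List.pyRange (a - 1) 0 (-1) := by
  simp only [PySem.List.pyRange]
  norm_num
  rw [if_pos h]
  by_cases h2 : 1 < a
  · rw [if_pos h2]
    have h3 : a.toNat = (a.toNat - 1) + 1 := by omega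
    rw [h3, List.range_succ_eq_map, List.map_cons, List.map_map]
    congr 1
    · norm_num
    · apply List.map_congr_left
      intro x _
      simp [Function.comp]
      ring
  · have ha : a = 1 := by omega
    subst ha
    norm_num

lemma fold_const (c : Char) (m : Int) (acc : List Char) :
    (PySem.List.pyRange 0 m 1).foldl (fun s _ => s ++ [c]) acc = acc ++ List.replicate m.toNat c := by
  rw [show (fun (s : List Char) (_ : Int) => s ++ [c]) = (fun s x => s ++ [(fun _ => c) x]) from rfl]
  rw [PySem.List.foldl_append_singleton_eq_map]
  congr 1
  rw [PySem.List.pyRange_one]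
  simp [Function.comp_def, List.map_const']

lemma main_chars : ∀ (m : Nat) (k n : Int), k.toNat = m → 0 < k → k ≤ n →
    recursive_triangle_chars k n
      = PySem.Chars.join ['\n'] ((PySem.List.pyRange k 0 (-1)).map (rtRow n)) := by
  intro m
  induction m with
  | zero => intro k n hm hk _; omega
  | succ m ih =>
    intro k n hm hk hkn
    rw [pyRange_neg1_cons k hk, List.map_cons]
    by_cases hk1 : k = 1
    · subst hk1
      rw [recursive_triangle_chars]
      rw [dif_pos ⟨by omega, hk⟩, if_pos hkn, dif_pos rfl]
      rw [fold_const, show PySem.List.pyRange (1 - 1) 0 (-1) = ([] : List Int) from by decide,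
        List.map_nil, PySem.Chars.join_singleton, rtRow]
      simp
    · have hk2 : 2 ≤ k := by omega
      have hcons : PySem.List.pyRange (k - 1) 0 (-1)
          = (k - 1) :: PySem.List.pyRange (k - 1 - 1) 0 (-1) := pyRange_neg1_cons (k - 1) (by omega)
      rw [hcons, List.map_cons, PySem.Chars.join_cons_cons, ← List.map_cons, ← hcons]
      rw [recursive_triangle_chars]
      rw [dif_pos (by constructor <;> omega), if_pos hkn, dif_neg hk1]
      rw [fold_const, fold_const, List.nil_append]
      rw [ih (k - 1) n (by omega) (by omega) (by omega)]
      simp [rtRow]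

lemma chars_eq (k n : Int) : recursive_triangle_chars k n = recursive_triangle_alt_chars k n := by
  rw [recursive_triangle_alt_chars]
  by_cases h : n > 0 ∧ k > 0
  · rw [if_pos h]
    by_cases hkn : k ≤ n
    · rw [if_pos hkn]
      exact main_chars k.toNat k n rfl h.2 hkn
    · rw [if_neg hkn, recursive_triangle_chars, dif_pos h, if_neg hkn]
  · rw [if_neg h, recursive_triangle_chars, dif_neg h]

-- ===== VERDICT (by name: the statement is the Claim_ definition above) =====
theorem recursive_triangle_spec : Claim_equal_recursive_triangle := by
  intro k n _
  unfold Spec_recursive_triangle recursive_triangle recursive_triangle_alt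
  rw [chars_eq]
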